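-- pv_equiv track=rewrite | github.com/Larry7939/Algorithm | Python/a.py | solution
-- ===== SOURCE A (Python) =====
-- def solution(card, word):
--     # 결과 리스트 answer
--     answer = []
--
--     # 각 단어에 대해 확인
--     for w in word: # O(10)
--         # 세 줄에서 필요한 문자를 저장할 리스트
--         needed = [[], [], []]
--
--         # 단어의 각 문자에 대해 확인
--         for char in w: # O(24)
--             # 문자가 어느 줄에 있는지 확인하고 해당 줄의 필요한 문자 리스트에 추가
--             for i in range(3): # O(3)
--                 if char in card[i]:
--                     needed[i].append(char)
--                     break
--
--         # 1. all(needed) -> needed의 요소 리스트들이 비어있지 않은지 확인 -> 각 줄에서 문자를 하나라도 사용했는지 확인 -> 만약 한 줄에서라도 사용하지 않은 경우에는 단어를 만들 수 없음.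
--         # 2. 각 줄에서 사용된 문자의 카운트 합과 단어의 길이를 비교하여 실제로 만들 수 있는 단어인지 확인
--         if all(needed) and sum(len(lst) for lst in needed) == len(w):
--             valid = True
--             for i in range(3): # O(3)
--                 # 해당 줄에서 필요한 문자의 수를 카운트
--                 count = {char: needed[i].count(char) for char in set(needed[i])}
--                 # 카드에서 각 문자의 수가 충분한지 확인
--                 for char, cnt in count.items():
--                     if card[i].count(char) < cnt:
--                         valid = False
--                         break
--                 if not valid:
--                     break
--
--             # 유효하면 결과 리스트에 단어 추가
--             if valid:
--                 answer.append(w)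
--
--     # 결과가 비어 있으면 ["-1"]을 반환
--     if not answer:
--         return ["-1"]
--
--     return answer
-- ===== SOURCE B (Python) =====
-- def solution(card, word):
--     # Build one count table per card row (first three rows), once.
--     rows = card[:3]
--     stock = []
--     for r in rows:
--         d = {}
--         for ch in r:
--             d[ch] = d.get(ch, 0) + 1
--         stock.append(d)
--
--     answer = []
--     for w in word:
--         remaining = [dict(d) for d in stock]
--         used = set()
--         ok = True
--         for ch in w:
--             for i, d in enumerate(stock):
--                 if ch in d:  # first row that ORIGINALLY contains ch
--                     used.add(i)
--                     remaining[i][ch] -= 1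
--                     if remaining[i][ch] < 0:
--                         ok = False
--                     break
--             else:
--                 ok = False
--             if not ok:
--                 break
--         if ok and len(used) == 3:
--             answer.append(w)
--
--     return answer if answer else ["-1"]
-- ===== Notes on version B (the rewrite author's own statement) =====
-- stated objective: alternative
-- what changed: A collects per-row needed-character lists for each word and then verifies them in a second phase with per-row count dictionaries; B precomputes one count table per card row once and checks each word in a single online pass that consumes from fresh copies of those tables, failing early on a missing character or an overdrawn row and accepting iff all three rows were used.
import Mathlib
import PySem

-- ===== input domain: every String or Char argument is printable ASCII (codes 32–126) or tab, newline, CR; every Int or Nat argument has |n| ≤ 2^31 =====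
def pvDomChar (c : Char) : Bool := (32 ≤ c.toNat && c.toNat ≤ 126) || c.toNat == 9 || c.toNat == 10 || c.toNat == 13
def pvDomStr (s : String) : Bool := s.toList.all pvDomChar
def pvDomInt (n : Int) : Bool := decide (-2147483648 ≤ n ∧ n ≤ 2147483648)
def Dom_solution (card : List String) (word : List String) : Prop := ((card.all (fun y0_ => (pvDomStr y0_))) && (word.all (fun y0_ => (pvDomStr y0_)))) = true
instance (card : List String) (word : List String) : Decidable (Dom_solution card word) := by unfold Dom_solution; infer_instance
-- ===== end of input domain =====

-- B replaces A's collect-then-verify per word by one online pass consuming precomputed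
-- per-row count tables (objective: alternative decomposition, similar cost).

-- ===== PORT A =====
-- card[i] (Python raises IndexError out of range; those inputs are outside Pre_solution)
def pvRowA (card : List String) (i : Nat) : String := (PySem.List.pyGet? card (i : Int)).getD ""

-- inner loop of A: for i in range(3): if char in card[i]: needed[i].append(char); break
-- ('char in card[i]' for a single character is exactly char membership in the row's characters)
def pvNeedStep (card : List String) (st : List Char × List Char × List Char) (c : Char) :
    List Char × List Char × List Char :=
  if (pvRowA card 0).toList.contains c then (st.1 ++ [c], st.2.1, st.2.2)
  else if (pvRowA card 1).toList.contains c then (st.1, st.2.1 ++ [c], st.2.2)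
  else if (pvRowA card 2).toList.contains c then (st.1, st.2.1, st.2.2 ++ [c])
  else st

-- count = {char: needed[i].count(char) for char in set(needed[i])}, then the items loop with break
-- ('card[i].count(char)' for a single character is exactly a character count in the row)
def pvValidRow (row : String) (n : List Char) : Bool :=
  let cnt : PySem.Dict Char Int :=
    (PySem.Set.ofList n).foldl (fun d ch => d.insert ch ((n.count ch : Int))) PySem.Dict.empty
  cnt.items.foldl
    (fun v p => if v then (if ((row.toList.count p.1 : Int) < p.2) then false else v) else v) true

def solution (card : List String) (word : List String) : List String :=
  let answer := word.foldl (fun answer w =>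
    let needed := w.toList.foldl (pvNeedStep card) ([], [], [])
    if (!needed.1.isEmpty && !needed.2.1.isEmpty && !needed.2.2.isEmpty)
        && ((PySem.List.len needed.1 + PySem.List.len needed.2.1 + PySem.List.len needed.2.2)
              == PySem.Str.len w) then
      -- valid-loop over the three rows; '&&' short-circuits exactly like A's break
      if pvValidRow (pvRowA card 0) needed.1 && pvValidRow (pvRowA card 1) needed.2.1
          && pvValidRow (pvRowA card 2) needed.2.2 then answer ++ [w]
      else answer
    else answer) []
  if answer.isEmpty then ["-1"] else answer

-- ===== PORT B =====
-- per-row count table: d = {}; for ch in r: d[ch] = d.get(ch, 0) + 1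
def pvRowCount (r : String) : PySem.Dict Char Int :=
  r.toList.foldl (fun d ch => d.insert ch (d.getD ch 0 + 1)) PySem.Dict.empty

-- for i, d in enumerate(stock): if ch in d: break  /  else: None
def pvFindRow : List (PySem.Dict Char Int) → Char → Nat → Option Nat
  | [], _, _ => none
  | d :: rest, ch, i => if PySem.Dict.contains d ch then some i else pvFindRow rest ch (i + 1)

-- one character step of B's online pass; state = (remaining, used, ok)
def pvStepB (stock : List (PySem.Dict Char Int))
    (st : List (PySem.Dict Char Int) × PySem.Set Nat × Bool) (ch : Char) :
    List (PySem.Dict Char Int) × PySem.Set Nat × Bool :=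
  if st.2.2 = false then st   -- if not ok: break
  else
    match pvFindRow stock ch 0 with
    | none => (st.1, st.2.1, false)
    | some i =>
      let v := (st.1.getD i PySem.Dict.empty).getD ch 0 - 1   -- remaining[i][ch] -= 1
      (st.1.set i ((st.1.getD i PySem.Dict.empty).insert ch v), PySem.Set.add st.2.1 i,
        if v < 0 then false else st.2.2)

def solution_alt (card : List String) (word : List String) : List String :=
  let stock := (PySem.List.slice card none (some 3)).map pvRowCount
  let answer := word.foldl (fun answer w =>
    let st := w.toList.foldl (pvStepB stock) (stock, PySem.Set.empty, true)
    if st.2.2 && (PySem.Set.len st.2.1 == 3) then answer ++ [w] else answer) []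
  if answer.isEmpty then ["-1"] else answer

-- ===== PRECONDITION & SPEC =====
-- Pre_ is exactly where Python A returns: either at least three card rows, or (with fewer
-- rows) every character of every word occurs in some existing row — otherwise A's inner loop
-- reads card[i] past the end and raises IndexError.
def Pre_solution (card : List String) (word : List String) : Prop :=
  3 ≤ card.length ∨ ∀ w ∈ word, ∀ c ∈ w.toList, ∃ r ∈ card, c ∈ r.toList
instance (card : List String) (word : List String) : Decidable (Pre_solution card word) := by
  unfold Pre_solution; infer_instance

def pvWitness_solution : List String × List String := (["abc", "de", "f"], ["ad", "adf", "fed"])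

def Spec_solution (card : List String) (word : List String) (out : List String) : Prop :=
  out = solution_alt card word
instance (card : List String) (word : List String) (out : List String) :
    Decidable (Spec_solution card word out) := by unfold Spec_solution; infer_instance

-- ===== CLAIM (what is proved, stated in full; the proofs are below) =====
def Claim_equal_solution : Prop := ∀ (card : List String) (word : List String),
  Dom_solution card word → Pre_solution card word → Spec_solution card word (solution card word)

-- ===== LEMMAS AND PROOFS =====

def pvAssign (r0 r1 r2 : String) (c : Char) : Option Nat :=
  if c ∈ r0.toList then some 0 else if c ∈ r1.toList then some 1
  else if c ∈ r2.toList then some 2 else none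

def pvRowC (r0 r1 r2 : String) (i : Nat) : List Char :=
  (if i = 0 then r0 else if i = 1 then r1 else r2).toList

theorem pvAssign_lt (r0 r1 r2 : String) (c : Char) (i : Nat)
    (h : pvAssign r0 r1 r2 c = some i) : i < 3 := by
  unfold pvAssign at h; split_ifs at h <;> simp_all <;> omega

-- guarded fold = all
theorem pvFoldGuard {α : Type} (P : α → Prop) [DecidablePred P] (items : List α) (acc : Bool) :
    items.foldl (fun v p => if v then (if P p then false else v) else v) acc
      = (acc && items.all (fun p => decide (¬ P p))) := by
  induction items generalizing acc with
  | nil => simp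
  | cons a t ih =>
    rw [List.foldl_cons, ih]
    cases acc <;> by_cases h : P a <;> simp [h]

theorem pvRowA_0 (r0 r1 r2 : String) (rest : List String) :
    pvRowA (r0 :: r1 :: r2 :: rest) 0 = r0 := by simp [pvRowA]
theorem pvRowA_1 (r0 r1 r2 : String) (rest : List String) :
    pvRowA (r0 :: r1 :: r2 :: rest) 1 = r1 := by
  rw [pvRowA, show ((1:Nat):Int) = ((1:Nat):Int) from rfl, PySem.List.pyGet?_natCast]; rfl
theorem pvRowA_2 (r0 r1 r2 : String) (rest : List String) :
    pvRowA (r0 :: r1 :: r2 :: rest) 2 = r2 := by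
  rw [pvRowA, show ((2:Nat):Int) = ((2:Nat):Int) from rfl, PySem.List.pyGet?_natCast]; rfl

theorem pvNeed_eq (r0 r1 r2 : String) (rest : List String) (l : List Char)
    (a b c' : List Char) :
    l.foldl (pvNeedStep (r0 :: r1 :: r2 :: rest)) (a, b, c') =
      (a ++ l.filter (fun c => pvAssign r0 r1 r2 c == some 0),
       b ++ l.filter (fun c => pvAssign r0 r1 r2 c == some 1),
       c' ++ l.filter (fun c => pvAssign r0 r1 r2 c == some 2)) := by
  induction l generalizing a b c' with
  | nil => simp
  | cons c t ih =>
    rw [List.foldl_cons]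
    by_cases h0 : c ∈ r0.toList
    · simp [pvNeedStep, pvRowA_0, pvRowA_1, pvRowA_2, h0, ih, pvAssign, List.filter_cons]
    · by_cases h1 : c ∈ r1.toList
      · simp [pvNeedStep, pvRowA_0, pvRowA_1, pvRowA_2, h0, h1, ih, pvAssign, List.filter_cons]
      · by_cases h2 : c ∈ r2.toList <;>
          simp [pvNeedStep, pvRowA_0, pvRowA_1, pvRowA_2, h0, h1, h2, ih, pvAssign, List.filter_cons]

theorem pvValidRow_iff (row : String) (n : List Char) :
    pvValidRow row n = true ↔
      ∀ ch ∈ n, (n.count ch : Int) ≤ (row.toList.count ch : Int) := by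
  simp only [pvValidRow]
  rw [PySem.Dict.items_foldl_insert_fresh (PySem.Set.ofList n) (fun ch => ch)
        (fun ch => (n.count ch : Int)) PySem.Dict.empty
        (by intro a _; rfl)
        (by simpa using PySem.Set.nodup_ofList n)]
  rw [pvFoldGuard]
  simp [List.all_map, List.all_eq_true, PySem.Set.mem_ofList, not_lt, PySem.Dict.empty, PySem.Dict.items]

def pvGood (r0 r1 r2 : String) (l : List Char) : Prop :=
  (∀ c ∈ l, ∃ i, pvAssign r0 r1 r2 c = some i ∧
      (l.count c : Int) ≤ ((pvRowC r0 r1 r2 i).count c : Int))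
  ∧ (∀ i, i < 3 → ∃ c ∈ l, pvAssign r0 r1 r2 c = some i)

theorem pvSum (r0 r1 r2 : String) (l : List Char) :
    (l.filter (fun c => pvAssign r0 r1 r2 c == some 0)).length
      + (l.filter (fun c => pvAssign r0 r1 r2 c == some 1)).length
      + (l.filter (fun c => pvAssign r0 r1 r2 c == some 2)).length
      = l.countP (fun c => (pvAssign r0 r1 r2 c).isSome) := by
  induction l with
  | nil => rfl
  | cons c t ih =>
    simp only [List.filter_cons, List.countP_cons]
    have h3 : ∀ i, pvAssign r0 r1 r2 c = some i → i < 3 := pvAssign_lt r0 r1 r2 c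
    rcases h : pvAssign r0 r1 r2 c with _ | i
    · simpa [h] using ih
    · have hi : i < 3 := h3 i h
      interval_cases i <;> simp [h, ih] <;> omega

theorem pvCondA_iff (r0 r1 r2 : String) (w : String) :
    ((( !(w.toList.filter (fun c => pvAssign r0 r1 r2 c == some 0)).isEmpty
        && !(w.toList.filter (fun c => pvAssign r0 r1 r2 c == some 1)).isEmpty
        && !(w.toList.filter (fun c => pvAssign r0 r1 r2 c == some 2)).isEmpty)
      && ((PySem.List.len (w.toList.filter (fun c => pvAssign r0 r1 r2 c == some 0))
            + PySem.List.len (w.toList.filter (fun c => pvAssign r0 r1 r2 c == some 1))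
            + PySem.List.len (w.toList.filter (fun c => pvAssign r0 r1 r2 c == some 2)))
            == PySem.Str.len w)) = true
     ∧ (pvValidRow r0 (w.toList.filter (fun c => pvAssign r0 r1 r2 c == some 0))
        && pvValidRow r1 (w.toList.filter (fun c => pvAssign r0 r1 r2 c == some 1))
        && pvValidRow r2 (w.toList.filter (fun c => pvAssign r0 r1 r2 c == some 2))) = true)
    ↔ pvGood r0 r1 r2 w.toList := by
  set l := w.toList with hl
  have hlen : PySem.Str.len w = (l.length : Int) := by
    simp [PySem.Str.len_eq, hl]
  constructor
  · rintro ⟨h1, h2⟩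
    simp only [Bool.and_eq_true, beq_iff_eq, Bool.not_eq_eq_eq_not, Bool.not_true,
      List.isEmpty_eq_false_iff, ne_eq, List.filter_eq_nil_iff, not_forall] at h1
    obtain ⟨⟨⟨hn0, hn1⟩, hn2⟩, hsum⟩ := h1
    rw [hlen] at hsum
    simp only [PySem.List.len_eq] at hsum
    have hsum' : l.countP (fun c => (pvAssign r0 r1 r2 c).isSome) = l.length := by
      rw [← pvSum]; exact_mod_cast hsum
    have hAll : ∀ c ∈ l, (pvAssign r0 r1 r2 c).isSome := by
      simpa using List.countP_eq_length.mp hsum'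
    simp only [Bool.and_eq_true, pvValidRow_iff] at h2
    obtain ⟨⟨hv0, hv1⟩, hv2⟩ := h2
    constructor
    · intro c hc
      rcases Option.isSome_iff_exists.mp (hAll c hc) with ⟨i, hi⟩
      refine ⟨i, hi, ?_⟩
      have hmem : ∀ j, pvAssign r0 r1 r2 c = some j →
          c ∈ l.filter (fun c => pvAssign r0 r1 r2 c == some j) := by
        intro j hj; exact List.mem_filter.mpr ⟨hc, by simp [hj]⟩
      have hcount : ∀ j, pvAssign r0 r1 r2 c = some j →
          (l.filter (fun c => pvAssign r0 r1 r2 c == some j)).count c = l.count c := by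
        intro j hj; exact List.count_filter (by simp [hj])
      have hi3 : i < 3 := pvAssign_lt r0 r1 r2 c i hi
      interval_cases i
      · have := hv0 c (hmem 0 hi); rw [hcount 0 hi] at this; simpa [pvRowC] using this
      · have := hv1 c (hmem 1 hi); rw [hcount 1 hi] at this; simpa [pvRowC] using this
      · have := hv2 c (hmem 2 hi); rw [hcount 2 hi] at this; simpa [pvRowC] using this
    · intro i hi3
      interval_cases i
      · rcases hn0 with ⟨c, hc, hp⟩; exact ⟨c, hc, by simpa using hp⟩
      · rcases hn1 with ⟨c, hc, hp⟩; exact ⟨c, hc, by simpa using hp⟩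
      · rcases hn2 with ⟨c, hc, hp⟩; exact ⟨c, hc, by simpa using hp⟩
  · rintro ⟨hg1, hg2⟩
    have hAll : ∀ c ∈ l, (pvAssign r0 r1 r2 c).isSome := by
      intro c hc; rcases hg1 c hc with ⟨i, hi, _⟩; simp [hi]
    have hvalid : ∀ (j : Nat) (rj : String), pvRowC r0 r1 r2 j = rj.toList →
        pvValidRow rj (l.filter (fun c => pvAssign r0 r1 r2 c == some j)) = true := by
      intro j rj hrj
      rw [pvValidRow_iff]
      intro ch hch
      rcases List.mem_filter.mp hch with ⟨hchl, hpj⟩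
      have hpj' : pvAssign r0 r1 r2 ch = some j := by simpa using hpj
      rcases hg1 ch hchl with ⟨i, hi, hbound⟩
      rw [hpj'] at hi; obtain rfl : j = i := by injection hi
      rw [List.count_filter (by simp [hpj'])]
      rw [hrj] at hbound; exact hbound
    constructor
    · simp only [Bool.and_eq_true, beq_iff_eq, Bool.not_eq_eq_eq_not, Bool.not_true,
        List.isEmpty_eq_false_iff, ne_eq, List.filter_eq_nil_iff, not_forall]
      refine ⟨⟨⟨?_, ?_⟩, ?_⟩, ?_⟩
      · rcases hg2 0 (by norm_num) with ⟨c, hc, hp⟩; exact ⟨c, hc, by simp [hp]⟩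
      · rcases hg2 1 (by norm_num) with ⟨c, hc, hp⟩; exact ⟨c, hc, by simp [hp]⟩
      · rcases hg2 2 (by norm_num) with ⟨c, hc, hp⟩; exact ⟨c, hc, by simp [hp]⟩
      · rw [hlen]
        simp only [PySem.List.len_eq]
        have := pvSum r0 r1 r2 l
        have h2 := List.countP_eq_length.mpr (by simpa using hAll)
        exact_mod_cast (this.trans h2)
    · simp only [Bool.and_eq_true]
      exact ⟨⟨hvalid 0 r0 (by simp [pvRowC]), hvalid 1 r1 (by simp [pvRowC])⟩,
             hvalid 2 r2 (by simp [pvRowC])⟩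
-- ===== PORT B =====
theorem pvRowCount_eq (r : String) : pvRowCount r = PySem.Dict.counter r.toList :=
  PySem.Dict.foldl_insert_getD_add_one_eq_counter r.toList

theorem pvFindRow_eq (r0 r1 r2 : String) (c : Char) :
    pvFindRow [pvRowCount r0, pvRowCount r1, pvRowCount r2] c 0 = pvAssign r0 r1 r2 c := by
  simp [pvFindRow, pvRowCount_eq, PySem.Dict.contains_counter, pvAssign]

theorem pvFrozen (stock : List (PySem.Dict Char Int))
    (l : List Char) (st : List (PySem.Dict Char Int) × PySem.Set Nat × Bool)
    (h : st.2.2 = false) : l.foldl (pvStepB stock) st = st := by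
  induction l with
  | nil => rfl
  | cons c t ih => rw [List.foldl_cons, pvStepB, if_pos h]; exact ih

theorem pvFoldB (r0 r1 r2 : String) (l : List Char) :
    ∀ (m : List Char) (rem : List (PySem.Dict Char Int)) (used : PySem.Set Nat),
    rem.length = 3 →
    (∀ ch i, pvAssign r0 r1 r2 ch = some i →
        (rem.getD i PySem.Dict.empty).getD ch 0
          = ((pvRowC r0 r1 r2 i).count ch : Int) - (m.count ch : Int)) →
    (((l.foldl (pvStepB [pvRowCount r0, pvRowCount r1, pvRowCount r2]) (rem, used, true)).2.2 = true
        ↔ ∀ c ∈ l, ∃ i, pvAssign r0 r1 r2 c = some i ∧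
            (((m ++ l).count c : Int)) ≤ ((pvRowC r0 r1 r2 i).count c : Int))
     ∧ ((l.foldl (pvStepB [pvRowCount r0, pvRowCount r1, pvRowCount r2]) (rem, used, true)).2.2 = true →
          (l.foldl (pvStepB [pvRowCount r0, pvRowCount r1, pvRowCount r2]) (rem, used, true)).2.1
            = PySem.Set.update used (l.filterMap (pvAssign r0 r1 r2)))) := by
  induction l with
  | nil =>
    intro m rem used _ _
    refine ⟨by simp, fun _ => rfl⟩
  | cons c t ih =>
    intro m rem used hlen hinv
    rw [List.foldl_cons]
    rcases h : pvAssign r0 r1 r2 c with _ | i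
    · -- character in no row
      have hst : pvStepB [pvRowCount r0, pvRowCount r1, pvRowCount r2] (rem, used, true) c
          = (rem, used, false) := by
        simp [pvStepB, pvFindRow_eq, h]
      rw [hst, pvFrozen _ _ _ rfl]
      constructor
      · simp only [Bool.false_eq_true, false_iff]
        intro hP
        rcases hP c (List.mem_cons_self) with ⟨i, hi, _⟩
        rw [h] at hi; cases hi
      · intro hfalse; cases hfalse
    · have hi3 : i < 3 := pvAssign_lt r0 r1 r2 c i h
      have hdval : (rem.getD i PySem.Dict.empty).getD c 0
          = ((pvRowC r0 r1 r2 i).count c : Int) - (m.count c : Int) := hinv c i h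
      set d := rem.getD i PySem.Dict.empty with hd
      set v : Int := d.getD c 0 - 1 with hv
      set rem' := rem.set i (d.insert c v) with hrem'
      have hst : pvStepB [pvRowCount r0, pvRowCount r1, pvRowCount r2] (rem, used, true) c
          = (rem', PySem.Set.add used i, if v < 0 then false else true) := by
        simp [pvStepB, pvFindRow_eq, h, hrem', hv, hd]
      have hlen' : rem'.length = 3 := by simp [hrem', hlen]
      have hgetD_eq : rem'.getD i PySem.Dict.empty = d.insert c v := by
        rw [List.getD_eq_getElem _ _ (by omega)]
        simp only [hrem', List.getElem_set _]
        simp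
      have hgetD_ne : ∀ j, j ≠ i → j < 3 →
          rem'.getD j PySem.Dict.empty = rem.getD j PySem.Dict.empty := by
        intro j hji hj3
        rw [List.getD_eq_getElem _ _ (by omega), List.getD_eq_getElem _ _ (by omega)]
        simp only [hrem', List.getElem_set _]
        rw [if_neg (fun hh => hji hh.symm)]
      have hinv' : ∀ ch j, pvAssign r0 r1 r2 ch = some j →
          (rem'.getD j PySem.Dict.empty).getD ch 0
            = ((pvRowC r0 r1 r2 j).count ch : Int) - (((m ++ [c]).count ch : Nat) : Int) := by
        intro ch j hj
        by_cases hji : j = i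
        · subst hji
          rw [hgetD_eq, PySem.Dict.getD_insert]
          by_cases hcc : ch = c
          · subst hcc
            simp [hv, hdval, List.count_append]
            omega
          · rw [if_neg hcc]
            rw [hinv ch j hj]
            have hc0 : List.count ch [c] = 0 := by
              rw [List.count_eq_zero]; simp [hcc]
            simp [List.count_append, hc0]
        · have hcc : ch ≠ c := by
            intro hcc; subst hcc; rw [h] at hj; exact hji (by injection hj with hh; exact hh.symm)
          rw [hgetD_ne j hji (pvAssign_lt r0 r1 r2 ch j hj)]
          rw [hinv ch j hj]
          have hc0 : List.count ch [c] = 0 := by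
            rw [List.count_eq_zero]; simp [hcc]
          simp [List.count_append, hc0]
      by_cases hneg : v < 0
      · rw [hst, if_pos hneg, pvFrozen _ _ _ rfl]
        constructor
        · simp only [Bool.false_eq_true, false_iff]
          intro hP
          rcases hP c (List.mem_cons_self) with ⟨j, hj, hb⟩
          rw [h] at hj
          obtain rfl : i = j := by injection hj
          have h1 : ((m ++ c :: t).count c : Int) = (m.count c : Int) + 1 + (t.count c : Int) := by
            simp [List.count_append]; omega
          rw [h1] at hb
          have : (t.count c : Int) ≥ 0 := by positivity
          omega
        · intro hfalse; cases hfalse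
      · rw [hst, if_neg hneg]
        obtain ⟨ih1, ih2⟩ := ih (m ++ [c]) rem' (PySem.Set.add used i) hlen' hinv'
        have hlist : (m ++ [c]) ++ t = m ++ c :: t := by simp
        constructor
        · rw [ih1]
          constructor
          · intro hP e he
            rcases List.mem_cons.mp he with rfl | het
            · refine ⟨i, h, ?_⟩
              by_cases hel : e ∈ t
              · rcases hP e hel with ⟨j, hj, hb⟩
                rw [h] at hj
                obtain rfl : i = j := by injection hj
                rw [hlist] at hb; exact hb
              · have h0 : t.count e = 0 := List.count_eq_zero.mpr hel
                have h1 : ((m ++ e :: t).count e : Int) = (m.count e : Int) + 1 := by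
                  simp [List.count_append, h0]
                rw [h1]
                omega
            · rcases hP e het with ⟨j, hj, hb⟩
              rw [hlist] at hb; exact ⟨j, hj, hb⟩
          · intro hP e he
            rcases hP e (List.mem_cons_of_mem c he) with ⟨j, hj, hb⟩
            rw [← hlist] at hb; exact ⟨j, hj, hb⟩
        · intro hok
          rw [ih2 hok]
          have : (c :: t).filterMap (pvAssign r0 r1 r2) = i :: t.filterMap (pvAssign r0 r1 r2) := by
            simp [h]
          rw [this]
          simp [PySem.Set.update]

theorem pvSetLen (s : PySem.Set Nat) : PySem.Set.len s = (s.length : Int) := rfl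

theorem pvLen3 (idxs : List Nat) (hb : ∀ x ∈ idxs, x < 3) :
    (PySem.Set.ofList idxs).length = 3 ↔ (0 ∈ idxs ∧ 1 ∈ idxs ∧ 2 ∈ idxs) := by
  have hnd := PySem.Set.nodup_ofList idxs
  have hmem : ∀ y, y ∈ PySem.Set.ofList idxs ↔ y ∈ idxs := PySem.Set.mem_ofList idxs
  set s := PySem.Set.ofList idxs with hs
  have hsub : s.toFinset ⊆ Finset.range 3 := by
    intro x hx
    rw [List.mem_toFinset] at hx
    exact Finset.mem_range.mpr (hb x ((hmem x).mp hx))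
  have hcard : s.toFinset.card = s.length := List.toFinset_card_of_nodup hnd
  constructor
  · intro h3
    have he : s.toFinset = Finset.range 3 :=
      Finset.eq_of_subset_of_card_le hsub (by simp [hcard, h3])
    refine ⟨?_, ?_, ?_⟩ <;> (rw [← hmem, ← List.mem_toFinset, he]; simp)
  · rintro ⟨h0, h1, h2⟩
    have hsup : Finset.range 3 ⊆ s.toFinset := by
      intro x hx
      rw [List.mem_toFinset, hmem]
      have := Finset.mem_range.mp hx
      interval_cases x <;> assumption
    have he : s.toFinset = Finset.range 3 := Finset.Subset.antisymm hsub hsup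
    rw [← hcard, he]; simp

theorem pvUpdate_nil (xs : List Nat) :
    PySem.Set.update (PySem.Set.empty : PySem.Set Nat) xs = PySem.Set.ofList xs :=
  (PySem.Set.ofList_eq_foldl xs).symm

theorem pvCondB_iff (r0 r1 r2 : String) (w : String) :
    ((((w.toList.foldl (pvStepB [pvRowCount r0, pvRowCount r1, pvRowCount r2])
        ([pvRowCount r0, pvRowCount r1, pvRowCount r2], PySem.Set.empty, true)).2.2
      && (PySem.Set.len (w.toList.foldl (pvStepB [pvRowCount r0, pvRowCount r1, pvRowCount r2])
        ([pvRowCount r0, pvRowCount r1, pvRowCount r2], PySem.Set.empty, true)).2.1 == 3)) = true)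
     ↔ pvGood r0 r1 r2 w.toList) := by
  have hinv0 : ∀ ch i, pvAssign r0 r1 r2 ch = some i →
      (([pvRowCount r0, pvRowCount r1, pvRowCount r2].getD i PySem.Dict.empty)).getD ch 0
        = ((pvRowC r0 r1 r2 i).count ch : Int) - ((([] : List Char).count ch : Nat) : Int) := by
    intro ch i hi
    have hi3 := pvAssign_lt r0 r1 r2 ch i hi
    interval_cases i <;>
      simp [pvRowC, pvRowCount_eq, PySem.Dict.getD_counter]
  obtain ⟨hB1, hB2⟩ := pvFoldB r0 r1 r2 w.toList []
    [pvRowCount r0, pvRowCount r1, pvRowCount r2] PySem.Set.empty rfl hinv0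
  have hbound : ∀ x ∈ w.toList.filterMap (pvAssign r0 r1 r2), x < 3 := by
    intro x hx
    rcases List.mem_filterMap.mp hx with ⟨c, _, hc⟩
    exact pvAssign_lt r0 r1 r2 c x hc
  constructor
  · intro hb
    rw [Bool.and_eq_true] at hb
    obtain ⟨hok, hl3⟩ := hb
    have hused := hB2 hok
    constructor
    · intro c hc
      rcases (hB1.mp hok) c hc with ⟨i, hi, hcnt⟩
      exact ⟨i, hi, by simpa using hcnt⟩
    · intro i hi3
      rw [hused, pvUpdate_nil, pvSetLen] at hl3
      have hlen := (pvLen3 _ hbound).mp (by exact_mod_cast of_decide_eq_true hl3)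
      have hmem : i ∈ w.toList.filterMap (pvAssign r0 r1 r2) := by
        interval_cases i
        · exact hlen.1
        · exact hlen.2.1
        · exact hlen.2.2
      rcases List.mem_filterMap.mp hmem with ⟨c, hcl, hc⟩
      exact ⟨c, hcl, hc⟩
  · rintro ⟨hg1, hg2⟩
    have hok : (w.toList.foldl (pvStepB [pvRowCount r0, pvRowCount r1, pvRowCount r2])
        ([pvRowCount r0, pvRowCount r1, pvRowCount r2], PySem.Set.empty, true)).2.2 = true := by
      rw [hB1]
      intro c hc
      rcases hg1 c hc with ⟨i, hi, hb⟩
      exact ⟨i, hi, by simpa using hb⟩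
    rw [Bool.and_eq_true]
    refine ⟨hok, ?_⟩
    rw [hB2 hok, pvUpdate_nil, pvSetLen]
    have : (PySem.Set.ofList (w.toList.filterMap (pvAssign r0 r1 r2))).length = 3 := by
      rw [pvLen3 _ hbound]
      refine ⟨?_, ?_, ?_⟩
      · rw [List.mem_filterMap]
        exact (hg2 0 (by norm_num)).imp (fun c hc => ⟨hc.1, hc.2⟩)
      · rw [List.mem_filterMap]
        exact (hg2 1 (by norm_num)).imp (fun c hc => ⟨hc.1, hc.2⟩)
      · rw [List.mem_filterMap]
        exact (hg2 2 (by norm_num)).imp (fun c hc => ⟨hc.1, hc.2⟩)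
    simp [this]

theorem pvStock (r0 r1 r2 : String) (rest : List String) :
    (PySem.List.slice (r0 :: r1 :: r2 :: rest) none (some 3)).map pvRowCount
      = [pvRowCount r0, pvRowCount r1, pvRowCount r2] := by
  rw [PySem.List.slice_to _ (by norm_num)]
  rfl


theorem pvRowA2_short (card : List String) (h : card.length < 3) : pvRowA card 2 = "" := by
  rcases card with _ | ⟨a, _ | ⟨b, _ | ⟨c, r⟩⟩⟩
  · rfl
  · rfl
  · rfl
  · exact absurd h (by simp)

theorem pvThird (card : List String) (h2 : pvRowA card 2 = "") :
    ∀ (l : List Char) (st : List Char × List Char × List Char), st.2.2 = [] →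
      (l.foldl (pvNeedStep card) st).2.2 = [] := by
  intro l
  induction l with
  | nil => intro st h; exact h
  | cons c t ih =>
    intro st h
    rw [List.foldl_cons]
    apply ih
    simp only [pvNeedStep, h2]
    split_ifs <;> simp_all
    
theorem pvShortAfold (card : List String) (h : card.length < 3) :
    ∀ (word : List String) (acc : List String),
      word.foldl (fun answer w =>
        let needed := w.toList.foldl (pvNeedStep card) ([], [], [])
        if (!needed.1.isEmpty && !needed.2.1.isEmpty && !needed.2.2.isEmpty)
            && ((PySem.List.len needed.1 + PySem.List.len needed.2.1 + PySem.List.len needed.2.2)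
                  == PySem.Str.len w) then
          if pvValidRow (pvRowA card 0) needed.1
              && pvValidRow (pvRowA card 1) needed.2.1
              && pvValidRow (pvRowA card 2) needed.2.2 then answer ++ [w]
          else answer
        else answer) acc = acc := by
  intro word
  induction word with
  | nil => intro acc; rfl
  | cons w t ih =>
    intro acc
    rw [List.foldl_cons, ih]
    have h3 := pvThird card (pvRowA2_short card h) w.toList ([], [], []) rfl
    simp [h3]

theorem pvFindRow_lt (stock : List (PySem.Dict Char Int)) :
    ∀ (rest : List (PySem.Dict Char Int)) (c : Char) (i0 j : Nat),
      pvFindRow rest c i0 = some j → j < i0 + rest.length := by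
  intro rest
  induction rest with
  | nil => intro c i0 j h; cases h
  | cons d t ih =>
    intro c i0 j h
    rw [pvFindRow] at h
    split_ifs at h with hc
    · injection h with h; simp; omega
    · have := ih c (i0 + 1) j h; simp; omega

theorem pvUsedBound (stock : List (PySem.Dict Char Int)) :
    ∀ (l : List Char) (st : List (PySem.Dict Char Int) × PySem.Set Nat × Bool),
      (∀ x ∈ st.2.1, x < stock.length) → st.2.1.Nodup →
      (∀ x ∈ (l.foldl (pvStepB stock) st).2.1, x < stock.length)
        ∧ ((l.foldl (pvStepB stock) st).2.1).Nodup := by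
  intro l
  induction l with
  | nil => intro st hb hn; exact ⟨hb, hn⟩
  | cons c t ih =>
    intro st hb hn
    rw [List.foldl_cons]
    rcases hok : st.2.2 with _ | _
    · rw [pvStepB, if_pos (by rw [hok])]
      exact ih st hb hn
    · rw [pvStepB, if_neg (by rw [hok]; simp)]
      rcases hf : pvFindRow stock c 0 with _ | i
      · exact ih _ hb hn
      · have hi : i < stock.length := by simpa using pvFindRow_lt stock stock c 0 i hf
        apply ih
        · intro x hx
          rcases (PySem.Set.mem_add st.2.1 i x).mp hx with hx' | rfl
          · exact hb x hx'
          · exact hi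
        · exact PySem.Set.nodup_add st.2.1 i hn

theorem pvNodupLen (s : List Nat) (n : Nat) (hn : s.Nodup) (hb : ∀ x ∈ s, x < n) :
    s.length ≤ n := by
  have hsub : s.toFinset ⊆ Finset.range n := by
    intro x hx; rw [List.mem_toFinset] at hx; exact Finset.mem_range.mpr (hb x hx)
  have := Finset.card_le_card hsub
  rwa [List.toFinset_card_of_nodup hn, Finset.card_range] at this

theorem pvShortBfold (card : List String) (h : card.length < 3) :
    ∀ (word : List String) (acc : List String),
      word.foldl (fun answer w =>
        let st := w.toList.foldl
            (pvStepB ((PySem.List.slice card none (some 3)).map pvRowCount))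
            ((PySem.List.slice card none (some 3)).map pvRowCount, PySem.Set.empty, true)
        if st.2.2 && (PySem.Set.len st.2.1 == 3) then answer ++ [w] else answer) acc = acc := by
  have hlen : ((PySem.List.slice card none (some 3)).map pvRowCount).length < 3 := by
    rw [PySem.List.slice_to _ (by norm_num)]
    simp; omega
  intro word
  induction word with
  | nil => intro acc; rfl
  | cons w t ih =>
    intro acc
    rw [List.foldl_cons]
    obtain ⟨hbound, hnodup⟩ := pvUsedBound
      ((PySem.List.slice card none (some 3)).map pvRowCount) w.toList
      ((PySem.List.slice card none (some 3)).map pvRowCount, PySem.Set.empty, true)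
      (by intro x hx; cases hx) List.nodup_nil
    have hle := pvNodupLen _ _ hnodup hbound
    have hne : (PySem.Set.len (w.toList.foldl
        (pvStepB ((PySem.List.slice card none (some 3)).map pvRowCount))
        ((PySem.List.slice card none (some 3)).map pvRowCount, PySem.Set.empty, true)).2.1 == 3)
        = false := by
      rw [pvSetLen]
      simp only [beq_eq_false_iff_ne, ne_eq]
      intro hcontra
      have h3 : (w.toList.foldl
          (pvStepB ((PySem.List.slice card none (some 3)).map pvRowCount))
          ((PySem.List.slice card none (some 3)).map pvRowCount, PySem.Set.empty, true)).2.1.length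
          = 3 := by exact_mod_cast hcontra
      omega
    simp only [hne, Bool.and_false, Bool.false_eq_true, if_false]
    exact ih acc

theorem pvFinal (card word : List String) (hpre : 3 ≤ card.length) :
    solution card word = solution_alt card word := by
  rcases card with _ | ⟨r0, _ | ⟨r1, _ | ⟨r2, rest⟩⟩⟩ <;> simp at hpre <;> try omega
  simp only [solution, solution_alt, pvStock]
  have hstep : ∀ (acc : List String) (w : String),
      (let needed := w.toList.foldl (pvNeedStep (r0 :: r1 :: r2 :: rest)) ([], [], [])
       if (!needed.1.isEmpty && !needed.2.1.isEmpty && !needed.2.2.isEmpty)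
           && ((PySem.List.len needed.1 + PySem.List.len needed.2.1 + PySem.List.len needed.2.2)
                 == PySem.Str.len w) then
         if pvValidRow (pvRowA (r0 :: r1 :: r2 :: rest) 0) needed.1
             && pvValidRow (pvRowA (r0 :: r1 :: r2 :: rest) 1) needed.2.1
             && pvValidRow (pvRowA (r0 :: r1 :: r2 :: rest) 2) needed.2.2 then acc ++ [w]
         else acc
       else acc)
      = (let st := w.toList.foldl (pvStepB [pvRowCount r0, pvRowCount r1, pvRowCount r2])
            ([pvRowCount r0, pvRowCount r1, pvRowCount r2], PySem.Set.empty, true)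
         if st.2.2 && (PySem.Set.len st.2.1 == 3) then acc ++ [w] else acc) := by
    intro acc w
    simp only [pvNeed_eq r0 r1 r2 rest w.toList [] [] [], List.nil_append,
      pvRowA_0, pvRowA_1, pvRowA_2]
    by_cases hg : pvGood r0 r1 r2 w.toList
    · obtain ⟨hA1, hA2⟩ := (pvCondA_iff r0 r1 r2 w).mpr hg
      have hB := (pvCondB_iff r0 r1 r2 w).mpr hg
      simp only [hA1, hA2, hB, if_pos]
    · have hBf : ¬ _ = true := fun hb => hg ((pvCondB_iff r0 r1 r2 w).mp hb)
      rw [if_neg hBf]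
      by_cases h1 : ((!(w.toList.filter (fun c => pvAssign r0 r1 r2 c == some 0)).isEmpty
            && !(w.toList.filter (fun c => pvAssign r0 r1 r2 c == some 1)).isEmpty
            && !(w.toList.filter (fun c => pvAssign r0 r1 r2 c == some 2)).isEmpty)
          && ((PySem.List.len (w.toList.filter (fun c => pvAssign r0 r1 r2 c == some 0))
                + PySem.List.len (w.toList.filter (fun c => pvAssign r0 r1 r2 c == some 1))
                + PySem.List.len (w.toList.filter (fun c => pvAssign r0 r1 r2 c == some 2)))
                == PySem.Str.len w)) = true
      · rw [if_pos h1]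
        by_cases h2 : (pvValidRow r0 (w.toList.filter (fun c => pvAssign r0 r1 r2 c == some 0))
            && pvValidRow r1 (w.toList.filter (fun c => pvAssign r0 r1 r2 c == some 1))
            && pvValidRow r2 (w.toList.filter (fun c => pvAssign r0 r1 r2 c == some 2))) = true
        · exact absurd ((pvCondA_iff r0 r1 r2 w).mp ⟨h1, h2⟩) hg
        · rw [if_neg h2]
      · rw [if_neg h1]
  have hfold : ∀ (ws : List String) (acc : List String),
      ws.foldl (fun answer w =>
        let needed := w.toList.foldl (pvNeedStep (r0 :: r1 :: r2 :: rest)) ([], [], [])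
        if (!needed.1.isEmpty && !needed.2.1.isEmpty && !needed.2.2.isEmpty)
            && ((PySem.List.len needed.1 + PySem.List.len needed.2.1 + PySem.List.len needed.2.2)
                  == PySem.Str.len w) then
          if pvValidRow (pvRowA (r0 :: r1 :: r2 :: rest) 0) needed.1
              && pvValidRow (pvRowA (r0 :: r1 :: r2 :: rest) 1) needed.2.1
              && pvValidRow (pvRowA (r0 :: r1 :: r2 :: rest) 2) needed.2.2 then answer ++ [w]
          else answer
        else answer) acc
      = ws.foldl (fun answer w =>
          let st := w.toList.foldl (pvStepB [pvRowCount r0, pvRowCount r1, pvRowCount r2])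
              ([pvRowCount r0, pvRowCount r1, pvRowCount r2], PySem.Set.empty, true)
          if st.2.2 && (PySem.Set.len st.2.1 == 3) then answer ++ [w] else answer) acc := by
    intro ws
    induction ws with
    | nil => intro acc; rfl
    | cons w t ih =>
      intro acc
      rw [List.foldl_cons, List.foldl_cons, hstep acc w]
      exact ih _
  rw [hfold]

theorem pvFinalShort (card word : List String) (h : card.length < 3) :
    solution card word = solution_alt card word := by
  simp only [solution, solution_alt]
  rw [pvShortAfold card h word [], pvShortBfold card h word []]

-- ===== VERDICT (by name: the statement is the Claim_ definition above) =====
theorem solution_spec : Claim_equal_solution := by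
  intro card word _ _
  unfold Spec_solution
  by_cases hlen : 3 ≤ card.length
  · exact pvFinal card word hlen
  · exact pvFinalShort card word (by omega)
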